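-- pv_equiv track=rewrite | github.com/bialimed/AnaCore-utils | bin/annotBND.py | getMostSupported
-- ===== SOURCE A (Python) =====
-- def getMostSupported(exons_sup_by_pos):
--     """
--     Return the position of the most supported exon boundaries.
--
--     :param exons_sup_by_pos: By positions of exons boundaries overlapped by the breakend, the number of alternative transcripts with this exon boundaries.
--     :type exons_sup_by_pos: dict
--     :return: The position of the most supported exon boundaries.
--     :rtype: int
--     """
--     selected_pos = None
--     max_support = 0
--     for curr_pos, curr_support in sorted(exons_sup_by_pos.items()):
--         if curr_support > max_support:
--             max_support = curr_support
--             selected_pos = curr_pos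
--     return selected_pos
-- ===== SOURCE B (Python) =====
-- def getMostSupported(exons_sup_by_pos):
--     max_support = max(exons_sup_by_pos.values(), default=0)
--     if max_support <= 0:
--         return None
--     return min(pos for pos, sup in exons_sup_by_pos.items() if sup == max_support)
-- ===== Notes on version B (the rewrite author's own statement) =====
-- stated objective: faster
-- what changed: Replaces the sort-then-running-max scan with a reduce-then-filtered-min decomposition: take the maximum support (default 0), return None if it is not positive, otherwise return the minimum position among entries achieving that maximum — no sort needed.
import Mathlib
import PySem

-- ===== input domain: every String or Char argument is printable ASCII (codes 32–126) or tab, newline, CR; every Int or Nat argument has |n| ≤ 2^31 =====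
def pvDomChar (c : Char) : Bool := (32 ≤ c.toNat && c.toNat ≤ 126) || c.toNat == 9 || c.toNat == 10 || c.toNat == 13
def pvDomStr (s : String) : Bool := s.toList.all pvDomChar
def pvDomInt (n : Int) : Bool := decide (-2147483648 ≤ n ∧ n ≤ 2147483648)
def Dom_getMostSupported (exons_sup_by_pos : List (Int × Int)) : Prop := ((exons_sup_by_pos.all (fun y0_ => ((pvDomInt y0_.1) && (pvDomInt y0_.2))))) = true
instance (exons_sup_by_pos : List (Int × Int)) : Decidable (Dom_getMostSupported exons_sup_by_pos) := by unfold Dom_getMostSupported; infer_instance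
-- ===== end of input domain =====

-- B replaces A's sort + running-max scan by max-of-supports then min-of-best-positions (simpler decomposition, same values).

-- ===== PORT A =====
-- literal port of A: iterate sorted(items) (tuple lexicographic order), keep (selected_pos, max_support), update when curr_support > max_support
def getMostSupported (exons_sup_by_pos : List (Int × Int)) : Option Int :=
  ((PySem.List.sorted2 exons_sup_by_pos (fun p => p.1) (fun p => p.2)).foldl
    (fun st p => if p.2 > st.2 then ((some p.1 : Option Int), p.2) else st)
    ((none : Option Int), (0 : Int))).1

-- ===== PORT B =====
-- literal port of Source B: max(values, default=0); if ≤ 0 → None; else min of positions whose support equals it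
def getMostSupported_alt (exons_sup_by_pos : List (Int × Int)) : Option Int :=
  let max_support := PySem.List.maxD (exons_sup_by_pos.map (fun p => p.2)) (fun x => x) 0
  if max_support ≤ 0 then none
  else PySem.List.min? ((exons_sup_by_pos.filter (fun p => p.2 == max_support)).map (fun p => p.1)) (fun x => x)

-- ===== PRECONDITION & SPEC =====
def Spec_getMostSupported (exons_sup_by_pos : List (Int × Int)) (out : Option Int) : Prop := out = getMostSupported_alt exons_sup_by_pos
instance (exons_sup_by_pos : List (Int × Int)) (out : Option Int) : Decidable (Spec_getMostSupported exons_sup_by_pos out) := by unfold Spec_getMostSupported; infer_instance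

-- ===== CLAIM (what is proved, stated in full; the proofs are below) =====
def Claim_equal_getMostSupported : Prop := ∀ (exons_sup_by_pos : List (Int × Int)), Dom_getMostSupported exons_sup_by_pos → Spec_getMostSupported exons_sup_by_pos (getMostSupported exons_sup_by_pos)

-- ===== LEMMAS AND PROOFS =====

-- the (non-strict) order sorted(items) establishes on pairs
def Rle (a b : Int × Int) : Prop := a.1 < b.1 ∨ (a.1 = b.1 ∧ a.2 ≤ b.2)

lemma Rle_trans {a b c : Int × Int} (h1 : Rle a b) (h2 : Rle b c) : Rle a c := by
  unfold Rle at *; rcases h1 with h1 | ⟨e1, l1⟩ <;> rcases h2 with h2 | ⟨e2, l2⟩ <;> [left; left; left; right] <;> omega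

lemma pairwise_insertBy_lex (x : Int × Int) (acc : List (Int × Int)) (h : acc.Pairwise Rle) :
    (PySem.List.insertBy (fun a b => decide (a.1 < b.1) || !decide (b.1 < a.1) && decide (a.2 < b.2)) x acc).Pairwise Rle := by
  induction acc with
  | nil => simp [PySem.List.insertBy, Rle]
  | cons y ys ih =>
    rcases List.pairwise_cons.mp h with ⟨hy, hys⟩
    by_cases hb : (decide (x.1 < y.1) || !decide (y.1 < x.1) && decide (x.2 < y.2)) = true
    · simp only [PySem.List.insertBy, hb, if_pos]
      have hxy : Rle x y := by unfold Rle; simp at hb; omega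
      refine List.pairwise_cons.mpr ⟨?_, h⟩
      intro z hz
      rcases List.mem_cons.mp hz with rfl | hz
      · exact hxy
      · exact Rle_trans hxy (hy z hz)
    · simp only [PySem.List.insertBy, hb, if_neg, Bool.not_eq_true]
      refine List.pairwise_cons.mpr ⟨?_, ih hys⟩
      intro z hz
      rw [PySem.List.mem_insertBy] at hz
      rcases hz with rfl | hz
      · unfold Rle; simp at hb; omega
      · exact hy z hz
lemma pairwise_sorted2 (l : List (Int × Int)) :
    (PySem.List.sorted2 l (fun p => p.1) (fun p => p.2)).Pairwise Rle := by
  show (l.foldl (fun acc x => PySem.List.insertBy (fun a b => decide (a.1 < b.1) || !decide (b.1 < a.1) && decide (a.2 < b.2)) x acc) []).Pairwise Rle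
  have : ∀ (acc : List (Int × Int)), acc.Pairwise Rle →
      (l.foldl (fun acc x => PySem.List.insertBy (fun a b => decide (a.1 < b.1) || !decide (b.1 < a.1) && decide (a.2 < b.2)) x acc) acc).Pairwise Rle := by
    induction l with
    | nil => intro acc h; simpa using h
    | cons p t ih => intro acc h; exact ih _ (pairwise_insertBy_lex p acc h)
  exact this [] (by simp)

-- upper bound for the running max of supports
lemma foldl_max_le (L : List (Int × Int)) (m c : Int) (hm : m ≤ c) (h : ∀ p ∈ L, p.2 ≤ c) :
    L.foldl (fun a p => max a p.2) m ≤ c := by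
  induction L generalizing m with
  | nil => simpa using hm
  | cons p t ih =>
    simp only [List.foldl_cons]
    exact ih _ (by have := h p (by simp); omega) (fun q hq => h q (by simp [hq]))

-- the running-max scan, characterised: final max is the fold of max, selected is the first element attaining it (if it beats the start)
lemma scan_eq (L : List (Int × Int)) (o : Option Int) (m : Int) :
    L.foldl (fun st p => if p.2 > st.2 then ((some p.1 : Option Int), p.2) else st) (o, m)
    = (if m < L.foldl (fun a p => max a p.2) m
         then (L.find? (fun p => p.2 == L.foldl (fun a p => max a p.2) m)).map (fun p => p.1)
         else o,
       L.foldl (fun a p => max a p.2) m) := by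
  induction L generalizing o m with
  | nil => simp
  | cons p t ih =>
    simp only [List.foldl_cons]
    by_cases hm : p.2 > m
    · rw [if_pos (by exact hm), ih]
      have hmax : max m p.2 = p.2 := by omega
      rw [hmax]
      have hle : p.2 ≤ t.foldl (fun a p => max a p.2) p.2 := (PySem.List.le_foldl_max_int t (fun p => p.2) p.2).1
      by_cases hlt : p.2 < t.foldl (fun a p => max a p.2) p.2
      · rw [if_pos hlt, if_pos (by omega)]
        have hne : (p.2 == t.foldl (fun a p => max a p.2) p.2) = false := by simp; omega
        rw [List.find?_cons_of_neg (by simp [hne])]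
      · have heq : t.foldl (fun a p => max a p.2) p.2 = p.2 := by omega
        rw [if_neg hlt, if_pos (by omega), heq]
        rw [List.find?_cons_of_pos (by simp)]
        simp
    · rw [if_neg hm, ih]
      have hmax : max m p.2 = m := by omega
      rw [hmax]
      by_cases hlt : m < t.foldl (fun a p => max a p.2) m
      · rw [if_pos hlt, if_pos hlt]
        have hne : (p.2 == t.foldl (fun a p => max a p.2) m) = false := by simp; omega
        rw [List.find?_cons_of_neg (by simp [hne])]
      · rw [if_neg hlt, if_neg hlt]

-- in a Rle-pairwise list, find? returns an element Rle-below every other matching element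
lemma find?_first_of_pairwise {pred : (Int × Int) → Bool} {S : List (Int × Int)} {q : Int × Int}
    (hp : S.Pairwise Rle) (hf : S.find? pred = some q) :
    ∀ r ∈ S, pred r = true → q = r ∨ Rle q r := by
  induction S with
  | nil => simp at hf
  | cons s S' ih =>
    rcases List.pairwise_cons.mp hp with ⟨hs, hS'⟩
    by_cases hps : pred s = true
    · rw [List.find?_cons_of_pos hps] at hf
      cases hf
      intro r hr _
      rcases List.mem_cons.mp hr with hr | hr
      · left; exact hr.symm
      · right; exact hs r hr
    · rw [List.find?_cons_of_neg (by simpa using hps)] at hf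
      intro r hr hpr
      rcases List.mem_cons.mp hr with hr | hr
      · subst hr; exact absurd hpr hps
      · exact ih hS' hf r hr hpr

theorem getMostSupported_eq (l : List (Int × Int)) : getMostSupported l = getMostSupported_alt l := by
  unfold getMostSupported getMostSupported_alt
  set S := PySem.List.sorted2 l (fun p => p.1) (fun p => p.2) with hS
  have hperm : S.Perm l := PySem.List.sorted2_perm l _ _ false
  rw [scan_eq]
  set M := S.foldl (fun a p => max a p.2) 0 with hM
  have hM0 : 0 ≤ M := (PySem.List.le_foldl_max_int S (fun p => p.2) 0).1
  have hMall : ∀ p ∈ S, p.2 ≤ M := (PySem.List.le_foldl_max_int S (fun p => p.2) 0).2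
  cases hmx : PySem.List.max? (l.map (fun p => p.2)) (fun x => x) with
  | none =>
    have hnil : l = [] := by
      have := (PySem.List.max?_eq_none_iff (l.map (fun p => p.2)) (fun x => x)).mp hmx
      simpa using this
    subst hnil
    have hSnil : S = [] := hperm.eq_nil
    simp [PySem.List.maxD, hSnil, hM, PySem.List.max?]
  | some v =>
    have hvmem : v ∈ l.map (fun p => p.2) := PySem.List.max?_mem hmx
    have hvmax : ∀ y ∈ l.map (fun p => p.2), y ≤ v := PySem.List.max?_isMax hmx
    rcases List.mem_map.mp hvmem with ⟨p, hpl, hpv⟩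
    have hpS : p ∈ S := hperm.mem_iff.mpr hpl
    have hvM : v ≤ M := hpv ▸ hMall p hpS
    have hMv : M ≤ max 0 v := by
      apply foldl_max_le
      · omega
      · intro q hq
        have : q.2 ≤ v := hvmax q.2 (List.mem_map.mpr ⟨q, hperm.mem_iff.mp hq, rfl⟩)
        omega
    simp only [PySem.List.maxD, hmx, Option.getD_some]
    by_cases hv : v ≤ 0
    · have hMz : M = 0 := by omega
      rw [if_pos hv, if_neg (by omega)]
    · have hMv' : M = v := by omega
      rw [if_neg hv, if_pos (by omega)]
      -- A's side: the first element of S with support M; B's side: min of matching positions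
      cases hf : S.find? (fun p => p.2 == M) with
      | none =>
        exfalso
        have := List.find?_eq_none.mp hf p hpS
        simp [hpv, hMv'] at this
      | some q =>
        have hqS : q ∈ S := List.mem_of_find?_eq_some hf
        have hq2 : q.2 = M := by have := List.find?_some hf; simpa using this
        have hqfilter : q.1 ∈ (l.filter (fun p => p.2 == v)).map (fun p => p.1) :=
          List.mem_map.mpr ⟨q, List.mem_filter.mpr ⟨hperm.mem_iff.mp hqS, by simp [hq2, hMv']⟩, rfl⟩
        cases hmin : PySem.List.min? ((l.filter (fun p => p.2 == v)).map (fun p => p.1)) (fun x => x) with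
        | none =>
          exfalso
          have := (PySem.List.min?_eq_none_iff _ _).mp hmin
          rw [this] at hqfilter; simp at hqfilter
        | some w =>
          have hwmem := PySem.List.min?_mem hmin
          have hwmin : ∀ y ∈ (l.filter (fun p => p.2 == v)).map (fun p => p.1), w ≤ y :=
            PySem.List.min?_isMin hmin
          rcases List.mem_map.mp hwmem with ⟨r, hrf, hrw⟩
          rcases List.mem_filter.mp hrf with ⟨hrl, hrv⟩
          have hrS : r ∈ S := hperm.mem_iff.mpr hrl
          have hr2 : r.2 = M := by simp at hrv; omega
          have h1 : w ≤ q.1 := hwmin q.1 hqfilter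
          have h2 : q.1 ≤ w := by
            rcases find?_first_of_pairwise (hS ▸ pairwise_sorted2 l) hf r hrS (by simp [hr2]) with h | h
            · subst h; omega
            · unfold Rle at h; omega
          simp
          omega

-- ===== VERDICT (by name: the statement is the Claim_ definition above) =====
theorem getMostSupported_spec : Claim_equal_getMostSupported := by
  intro l _
  unfold Spec_getMostSupported
  exact getMostSupported_eq l
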